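-- pv_equiv track=rewrite | github.com/lao1a0/ai-code-review-helper | core/services/webhook.py | _first_comment_position
-- ===== SOURCE A (Python) =====
-- from typing import Dict, Any, Optional, List, Tuple
--
-- def _first_comment_position(patch: str) -> Optional[int]:
--     if not patch:
--         return None
--     position = 0
--     first_context = None
--     for line in patch.splitlines():
--         if line.startswith(('@@', ' ', '+', '-')):
--             position += 1
--             if line.startswith('+') and not line.startswith('+++'):
--                 return position
--             if first_context is None and line.startswith(' '):
--                 first_context = position
--     return first_context if first_context is not None else (position if position > 0 else None)
-- ===== SOURCE B (Python) =====
-- def _first_comment_position(patch):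
--     if not patch:
--         return None
--     counted = [l for l in patch.splitlines()
--                if l.startswith(('@@', ' ', '+', '-'))]
--     cands = [(0, p) for p, l in enumerate(counted, 1)
--              if l.startswith('+') and not l.startswith('+++')]
--     cands += [(1, p) for p, l in enumerate(counted, 1) if l.startswith(' ')]
--     if counted:
--         cands.append((2, len(counted)))
--     return min(cands)[1] if cands else None
-- ===== Notes on version B (the rewrite author's own statement) =====
-- stated objective: alternative
-- what changed: Replaced A's early-exit scan with a fallback register by candidate generation plus selection: every counted line yields a (priority, position) candidate (0 = added, 1 = context, plus a (2, count) sentinel) and the answer is min(candidates)[1] under lexicographic tuple order, so no search order or early exit is involved.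
import Mathlib
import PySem

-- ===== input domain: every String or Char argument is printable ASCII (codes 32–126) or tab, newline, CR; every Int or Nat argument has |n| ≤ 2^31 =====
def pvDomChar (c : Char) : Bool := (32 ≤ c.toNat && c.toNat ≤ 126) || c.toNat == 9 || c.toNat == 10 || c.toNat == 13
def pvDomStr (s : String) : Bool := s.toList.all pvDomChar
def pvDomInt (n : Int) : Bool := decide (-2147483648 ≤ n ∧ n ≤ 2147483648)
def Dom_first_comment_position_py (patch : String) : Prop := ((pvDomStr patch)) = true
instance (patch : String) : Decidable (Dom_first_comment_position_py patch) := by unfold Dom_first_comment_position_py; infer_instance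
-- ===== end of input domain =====

-- B replaces A's early-exit scan with a fallback register by candidate generation
-- ((priority, position) pairs) plus one lexicographic min() selection (alternative
-- decomposition, same cost; return value only).

-- ===== PORT A =====
-- line.startswith(('@@', ' ', '+', '-'))
def pvCounted (l : String) : Bool :=
  PySem.Str.startswith l "@@" || PySem.Str.startswith l " " ||
  PySem.Str.startswith l "+" || PySem.Str.startswith l "-"

-- the for-loop of A, carrying (position, first_context)
def pvALoop : List String → Int → Option Int → Option Int
  | [], position, firstContext =>
      match firstContext with
      | some c => some c
      | none => if position > 0 then some position else none
  | l :: ls, position, firstContext =>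
      if pvCounted l then
        let position := position + 1
        if PySem.Str.startswith l "+" && !(PySem.Str.startswith l "+++") then
          some position
        else
          pvALoop ls position
            (if firstContext = none && PySem.Str.startswith l " " then some position
             else firstContext)
      else pvALoop ls position firstContext

def first_comment_position_py (patch : String) : Option Int :=
  if patch = "" then none
  else pvALoop (PySem.Str.splitlines patch) 0 none

-- ===== PORT B =====
def pvAdded (l : String) : Bool :=
  PySem.Str.startswith l "+" && !(PySem.Str.startswith l "+++")

def pvContext (l : String) : Bool := PySem.Str.startswith l " "

def first_comment_position_py_alt (patch : String) : Option Int :=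
  if patch = "" then none
  else
    let counted := (PySem.Str.splitlines patch).filter pvCounted
    let e := PySem.List.enumerate counted 1
    let cands : List (Int × Int) :=
      (e.filter (fun pl => pvAdded pl.2)).map (fun pl => ((0 : Int), pl.1))
      ++ (e.filter (fun pl => pvContext pl.2)).map (fun pl => ((1 : Int), pl.1))
      ++ (if counted.isEmpty then [] else [((2 : Int), PySem.List.len counted)])
    match PySem.List.min2? cands Prod.fst Prod.snd with
    | some c => some c.2
    | none => none

-- ===== PRECONDITION & SPEC =====
def Spec_first_comment_position_py (patch : String) (out : Option Int) : Prop := out = first_comment_position_py_alt patch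
instance (patch : String) (out : Option Int) : Decidable (Spec_first_comment_position_py patch out) := by unfold Spec_first_comment_position_py; infer_instance

-- ===== CLAIM (what is proved, stated in full; the proofs are below) =====
def Claim_equal_first_comment_position_py : Prop := ∀ (patch : String), Dom_first_comment_position_py patch → Spec_first_comment_position_py patch (first_comment_position_py patch)

-- ===== LEMMAS AND PROOFS =====

-- invariant of A's loop: its result via first-index searches over the counted suffix
theorem pvALoop_char (ls : List String) (position : Int) (firstContext : Option Int) :
    pvALoop ls position firstContext =
      (match (ls.filter pvCounted).findIdx? pvAdded with
       | some i => some (position + (i : Int) + 1)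
       | none =>
         match firstContext with
         | some c => some c
         | none =>
           match (ls.filter pvCounted).findIdx? pvContext with
           | some i => some (position + (i : Int) + 1)
           | none =>
             if position + ((ls.filter pvCounted).length : Int) > 0 then
               some (position + ((ls.filter pvCounted).length : Int))
             else none) := by
  induction ls generalizing position firstContext with
  | nil =>
      simp [pvALoop]
  | cons l ls ih =>
      by_cases hc : pvCounted l
      · have hfc : (l :: ls).filter pvCounted = l :: ls.filter pvCounted := by
          simp [List.filter_cons, hc]
        rw [hfc]
        by_cases hplus : PySem.Chars.startswith l.toList ['+'] = true <;>
        by_cases hppp : PySem.Chars.startswith l.toList ['+','+','+'] = true <;>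
        by_cases hsp : PySem.Chars.startswith l.toList [' '] = true <;>
        cases firstContext <;>
          simp [pvALoop, pvAdded, pvContext, hc, hplus, hppp, hsp, List.findIdx?_cons, ih] <;>
          cases h : (ls.filter pvCounted).findIdx? pvAdded <;>
          simp [h] <;>
          (try cases h2 : (ls.filter pvCounted).findIdx? pvContext <;> simp [h2]) <;>
          push_cast <;>
          first
            | ring
            | omega
            | (split_ifs <;> simp only [Option.some.injEq] <;> omega)
      · have hc2 : pvCounted l = false := by simpa using hc
        have hfc : (l :: ls).filter pvCounted = ls.filter pvCounted := by
          simp [List.filter_cons, hc2]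
        rw [hfc]
        simp only [pvALoop, hc2, Bool.false_eq_true, if_false]
        exact ih position firstContext

-- Python's lexicographic order on int pairs (proof-side helper)
def pvLexLt (a b : Int × Int) : Prop := a.1 < b.1 ∨ (a.1 = b.1 ∧ a.2 < b.2)

-- the min2? fold step, named so the keep lemma applies to min2? definitionally
def pvStep (acc : Option (Int × Int)) (x : Int × Int) : Option (Int × Int) :=
  match acc with
  | none => some x
  | some m =>
    if (decide (Prod.fst x < Prod.fst m) ||
        !decide (Prod.fst m < Prod.fst x) && decide (Prod.snd x < Prod.snd m)) = true
    then some x else some m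

theorem pvMin2_eq_foldl (cands : List (Int × Int)) :
    PySem.List.min2? cands Prod.fst Prod.snd = cands.foldl pvStep none := by
  unfold PySem.List.min2?
  apply PySem.List.foldl_congr_mem
  intro acc x _
  cases acc <;> rfl

-- the min2? fold keeps an accumulator that is lex-below everything still to come
theorem pvMin2Keep (xs : List (Int × Int)) (m : Int × Int) (h : ∀ y ∈ xs, pvLexLt m y) :
    xs.foldl pvStep (some m) = some m := by
  induction xs generalizing m with
  | nil => rfl
  | cons y ys ih =>
      have hy := h y (by simp)
      have hcond : (decide (y.1 < m.1) || !decide (m.1 < y.1) && decide (y.2 < m.2)) = false := by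
        rcases hy with h1 | ⟨h1, h2⟩ <;> simp <;> omega
      simp only [List.foldl_cons, pvStep, hcond]
      exact ih m (fun z hz => h z (by simp [hz]))

-- min of a strictly lex-increasing candidate list is its head
theorem pvMin2Head (cands : List (Int × Int)) (h : cands.Pairwise pvLexLt) :
    PySem.List.min2? cands Prod.fst Prod.snd = cands.head? := by
  cases cands with
  | nil => rfl
  | cons x xs =>
      rcases List.pairwise_cons.mp h with ⟨hx, _⟩
      rw [pvMin2_eq_foldl]
      simp only [List.foldl_cons, pvStep, List.head?_cons]
      exact pvMin2Keep xs x hx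

-- position of the first matching enumerated line = first matching index
theorem pvEnumFilterHead (ls : List String) (p : String → Bool) (s : Int) :
    ((PySem.List.enumerate ls s).filter (fun pl => p pl.2)).head?.map Prod.fst
      = (ls.findIdx? p).map (fun i => s + (i : Int)) := by
  induction ls generalizing s with
  | nil => simp [PySem.List.enumerate_nil]
  | cons l ls ih =>
      rw [PySem.List.enumerate_cons, List.findIdx?_cons]
      by_cases hp : p l
      · simp [List.filter_cons, hp]
      · simp only [List.filter_cons, hp, Bool.false_eq_true, if_false, if_neg,
          cond_false]
        rw [ih (s + 1)]
        cases h : ls.findIdx? p <;> simp [h] <;> omega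

-- every candidate in the mapped-filtered block has the stated priority
theorem pvMemMapFst (e : List (Int × String)) (q : Int × String → Bool) (c : Int)
    (y : Int × Int) (hy : y ∈ (e.filter q).map (fun pl => (c, pl.1))) : y.1 = c := by
  rcases List.mem_map.mp hy with ⟨pl, _, rfl⟩
  rfl

-- the candidate list is strictly lex-increasing
theorem pvCandsPairwise (counted : List String) :
    ((((PySem.List.enumerate counted 1).filter (fun pl => pvAdded pl.2)).map
        (fun pl => ((0 : Int), pl.1))
      ++ ((PySem.List.enumerate counted 1).filter (fun pl => pvContext pl.2)).map
        (fun pl => ((1 : Int), pl.1)))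
      ++ (if counted.isEmpty then ([] : List (Int × Int))
          else [((2 : Int), PySem.List.len counted)])).Pairwise pvLexLt := by
  have hmono : (PySem.List.enumerate counted 1).Pairwise (fun p q => p.1 < q.1) :=
    PySem.List.pairwise_lt_enumerate counted 1
  have hblock : ∀ (q : Int × String → Bool) (c : Int),
      (((PySem.List.enumerate counted 1).filter q).map
        (fun pl => (c, pl.1))).Pairwise pvLexLt := by
    intro q c
    refine List.pairwise_map.mpr ?_
    exact (hmono.filter q).imp (fun h => Or.inr ⟨rfl, h⟩)
  refine (List.pairwise_append).mpr ⟨(List.pairwise_append).mpr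
    ⟨hblock (fun pl => pvAdded pl.2) 0, hblock (fun pl => pvContext pl.2) 1, ?_⟩, ?_, ?_⟩
  · intro x hx y hy
    have hx0 := pvMemMapFst _ _ _ _ hx
    have hy1 := pvMemMapFst _ _ _ _ hy
    exact Or.inl (by omega)
  · split <;> simp [List.pairwise_cons]
  · intro x hx y hy
    have hy2 : y.1 = 2 := by
      rcases List.mem_ite_nil_left.mp hy with ⟨_, hy⟩
      simp at hy; simp [hy]
    rcases List.mem_append.mp hx with hx | hx <;>
      [have := pvMemMapFst _ _ _ _ hx; have := pvMemMapFst _ _ _ _ hx] <;>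
      exact Or.inl (by omega)

-- B's value, characterised by the same first-index searches
theorem pvAltChar (patch : String) (h : ¬ patch = "") :
    first_comment_position_py_alt patch =
      (match (((PySem.Str.splitlines patch).filter pvCounted).findIdx? pvAdded).map
          (fun i => (1 : Int) + (i : Int)) with
       | some v => some v
       | none =>
         match (((PySem.Str.splitlines patch).filter pvCounted).findIdx? pvContext).map
             (fun i => (1 : Int) + (i : Int)) with
         | some v => some v
         | none =>
           if ((PySem.Str.splitlines patch).filter pvCounted).isEmpty then none
           else some (PySem.List.len ((PySem.Str.splitlines patch).filter pvCounted))) := by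
  unfold first_comment_position_py_alt
  simp only [h, if_false]
  set counted := (PySem.Str.splitlines patch).filter pvCounted with hcnt
  rw [pvMin2Head _ (pvCandsPairwise counted)]
  have hB : ∀ (o : Option (Int × Int)),
      (match o with | some c => some c.2 | none => none) = o.map Prod.snd := by
    intro o; cases o <;> rfl
  rw [hB]
  rw [List.head?_append, List.head?_append, Option.map_or, Option.map_or]
  have hblk : ∀ (q : String → Bool) (c : Int),
      ((((PySem.List.enumerate counted 1).filter (fun pl => q pl.2)).map
          (fun pl => (c, pl.1))).head?).map Prod.snd
        = (counted.findIdx? q).map (fun i => (1 : Int) + (i : Int)) := by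
    intro q c
    rw [List.head?_map, Option.map_map, ← pvEnumFilterHead counted q 1]
    rfl
  rw [hblk pvAdded 0, hblk pvContext 1]
  cases h0 : counted.findIdx? pvAdded with
  | some i => rfl
  | none =>
      cases h1 : counted.findIdx? pvContext with
      | some i => rfl
      | none =>
          simp only [Option.bind_eq_bind, Option.bind_none, Option.map_none, Option.none_or]
          split <;> rfl

-- ===== VERDICT (by name: the statement is the Claim_ definition above) =====
theorem first_comment_position_py_spec : Claim_equal_first_comment_position_py := by
  intro patch _
  unfold Spec_first_comment_position_py first_comment_position_py
  by_cases h : patch = ""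
  · simp [h, first_comment_position_py_alt]
  · simp only [h, if_false]
    rw [pvALoop_char, pvAltChar patch h]
    set counted := (PySem.Str.splitlines patch).filter pvCounted with hcnt
    cases h0 : counted.findIdx? pvAdded with
    | some i => simp; omega
    | none =>
        simp only [Option.map_none]
        cases h1 : counted.findIdx? pvContext with
        | some i => simp; omega
        | none =>
            simp only [Option.map_none, PySem.List.len_eq, List.isEmpty_iff]
            by_cases he : counted = []
            · simp [he]
            · have hl : 0 < counted.length := List.length_pos_iff.mpr he
              simp only [he, if_false]
              split_ifs with h2
              · simp
              · exfalso; omega
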